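-- pv_equiv track=rewrite | github.com/Dapizz01/AOC23 | day4/main.py | card_score
-- ===== SOURCE A (Python) =====
-- def card_score(winning_numbers, numbers):
--     winning_dict = {}
--     score = 0
--     for num in winning_numbers:
--         winning_dict[num] = 1
--
--     for num in numbers:
--         if num in winning_dict:
--             score += 1
--
--     return score
-- ===== SOURCE B (Python) =====
-- from collections import Counter
--
-- def card_score(winning_numbers, numbers):
--     counter = Counter(numbers)
--     total = 0
--     for w in set(winning_numbers):
--         total += counter[w]
--     return total
-- ===== Notes on version B (the rewrite author's own statement) =====
-- stated objective: alternative
-- what changed: B reverses the traversal: it builds a Counter frequency table of the drawn numbers once and sums the counts over the deduplicated winning set, instead of A's per-draw membership tests against a dict built from the winning numbers.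
import Mathlib
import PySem

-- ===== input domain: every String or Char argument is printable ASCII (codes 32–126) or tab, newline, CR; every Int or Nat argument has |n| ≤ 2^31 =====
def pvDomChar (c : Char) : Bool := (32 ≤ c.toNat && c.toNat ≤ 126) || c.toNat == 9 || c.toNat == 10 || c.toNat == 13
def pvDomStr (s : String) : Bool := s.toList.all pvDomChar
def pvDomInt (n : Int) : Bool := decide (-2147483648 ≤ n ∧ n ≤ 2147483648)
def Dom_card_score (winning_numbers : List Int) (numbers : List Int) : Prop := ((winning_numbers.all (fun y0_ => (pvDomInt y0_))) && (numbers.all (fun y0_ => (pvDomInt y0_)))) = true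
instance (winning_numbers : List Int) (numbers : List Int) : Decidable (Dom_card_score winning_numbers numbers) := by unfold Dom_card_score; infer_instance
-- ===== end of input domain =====

-- ===== PORT A =====

-- B builds a Counter over the draws and sums counts over the deduplicated winning set,
-- instead of A's per-draw membership tests against a dict keyed by the winning numbers.
-- ===== PORT A =====
def card_score (winning_numbers : List Int) (numbers : List Int) : Int :=
  let winning_dict := winning_numbers.foldl (fun d num => d.insert num (1 : Int)) PySem.Dict.empty
  numbers.foldl (fun score num => if winning_dict.contains num then score + 1 else score) 0

-- ===== PORT B =====
def card_score_alt (winning_numbers : List Int) (numbers : List Int) : Int :=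
  let counter := PySem.Dict.counter numbers
  (PySem.Set.ofList winning_numbers).foldl (fun total w => total + counter.getD w 0) 0

-- ===== PRECONDITION & SPEC =====
def Spec_card_score (winning_numbers : List Int) (numbers : List Int) (out : Int) : Prop := out = card_score_alt winning_numbers numbers
instance (winning_numbers : List Int) (numbers : List Int) (out : Int) : Decidable (Spec_card_score winning_numbers numbers out) := by unfold Spec_card_score; infer_instance

-- ===== CLAIM (what is proved, stated in full; the proofs are below) =====
def Claim_equal_card_score : Prop := ∀ (winning_numbers : List Int) (numbers : List Int), Dom_card_score winning_numbers numbers → Spec_card_score winning_numbers numbers (card_score winning_numbers numbers)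

-- ===== LEMMAS AND PROOFS =====

-- the keys of A's winning_dict are exactly the distinct winning numbers, in first-insertion order
theorem keys_winning_dict (w : List Int) :
    (w.foldl (fun d num => d.insert num (1 : Int)) PySem.Dict.empty).keys = PySem.Set.ofList w := by
  rw [PySem.Dict.keys_foldl_insert]
  simp only [PySem.Dict.keys_empty]
  exact PySem.Set.update_nil_left w

-- summing the indicator of one element over a duplicate-free list is its membership bit
theorem sum_indicator_nodup (s : List Int) (b : Int) (hs : s.Nodup) :
    (s.map (fun x => if x = b then (1 : Int) else 0)).sum = if b ∈ s then 1 else 0 := by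
  induction s with
  | nil => simp
  | cons a s ih =>
    simp only [List.nodup_cons] at hs
    simp only [List.map_cons, List.sum_cons, ih hs.2, List.mem_cons]
    by_cases hab : a = b
    · subst hab
      simp [hs.1]
    · simp [hab, Ne.symm hab]

-- counting draws that hit a duplicate-free set = summing per-winner draw counts over the set
theorem countP_mem_eq_sum_count (s : List Int) (n : List Int) (hs : s.Nodup) :
    ((n.countP (fun x => decide (x ∈ s)) : Int)) = (s.map (fun x => ((n.count x : Nat) : Int))).sum := by
  induction n with
  | nil => simp
  | cons b n ih =>
    have hcount : ∀ x : Int, ((((b :: n).count x : Nat)) : Int)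
        = ((n.count x : Nat) : Int) + (if x = b then (1 : Int) else 0) := by
      intro x
      by_cases hxb : x = b
      · subst hxb; rw [List.count_cons_self]; push_cast; simp
      · simp [hxb, Ne.symm hxb]
    have hmapsum : (s.map (fun x => (((b :: n).count x : Nat) : Int))).sum
        = (s.map (fun x => ((n.count x : Nat) : Int))).sum
          + (s.map (fun x => if x = b then (1 : Int) else 0)).sum := by
      calc (s.map (fun x => (((b :: n).count x : Nat) : Int))).sum
          = (s.map (fun x => ((n.count x : Nat) : Int) + (if x = b then (1 : Int) else 0))).sum := by
            congr 1; exact List.map_congr_left (fun x _ => hcount x)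
        _ = _ := by
            rw [← List.sum_map_add]
    rw [hmapsum, sum_indicator_nodup s b hs, ← ih]
    by_cases hb : b ∈ s
    · simp [hb]
    · simp [hb]

-- ===== VERDICT (by name: the statement is the Claim_ definition above) =====
theorem card_score_spec : Claim_equal_card_score := by
  intro w n _
  unfold Spec_card_score card_score card_score_alt
  have hcontains : ∀ x : Int,
      (w.foldl (fun d num => d.insert num (1 : Int)) PySem.Dict.empty).contains x
        = decide (x ∈ PySem.Set.ofList w) := by
    intro x
    by_cases hx : x ∈ PySem.Set.ofList w
    · have := (PySem.Dict.contains_iff_mem_keys (w.foldl (fun d num => d.insert num (1 : Int)) PySem.Dict.empty) x).mpr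
        (by rw [keys_winning_dict]; exact hx)
      simp [this, hx]
    · have : ¬ (w.foldl (fun d num => d.insert num (1 : Int)) PySem.Dict.empty).contains x = true := by
        rw [PySem.Dict.contains_iff_mem_keys, keys_winning_dict]; exact hx
      simp [Bool.not_eq_true] at this
      simp [this, hx]
  have hA : n.foldl (fun score num =>
      if (w.foldl (fun d num => d.insert num (1 : Int)) PySem.Dict.empty).contains num
      then score + 1 else score) 0
      = ((n.countP (fun x => decide (x ∈ PySem.Set.ofList w)) : Nat) : Int) := by
    have := PySem.List.foldl_count_if (fun x => decide (x ∈ PySem.Set.ofList w)) n 0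
    simp only [zero_add] at this
    rw [← this]
    apply PySem.List.foldl_congr_mem
    intro acc x _
    rw [hcontains x]
  have hB : (PySem.Set.ofList w).foldl (fun total x => total + (PySem.Dict.counter n).getD x 0) 0
      = ((PySem.Set.ofList w).map (fun x => ((n.count x : Nat) : Int))).sum := by
    rw [PySem.List.foldl_add]
    simp only [zero_add]
    congr 1
    exact List.map_congr_left (fun x _ => PySem.Dict.getD_counter n x)
  rw [hA, hB]
  exact countP_mem_eq_sum_count (PySem.Set.ofList w) n (PySem.Set.nodup_ofList w)
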